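-- pv_equiv track=rewrite | github.com/bryanjosefsarmiento-sudo/BINLATOR-GRP4 | bryan.py | octal_to_binary
-- ===== SOURCE A (Python) =====
-- def _is_octal_or_space(s: str) -> bool:
--     """True only if s contains digits 0–7 and/or whitespace."""
--     for ch in s:
--         if ch not in ("0","1","2","3","4","5","6","7"," ", "\t", "\n", "\r"):
--             return False
--     return True
--
-- def octal_to_binary(user):
--     try:
--         if not isinstance(user, str):
--             return "Error: Input must be a string of octal values."
--         if not user or user.isspace():
--             return "Error: Please enter something, not just spaces."
--         if not _is_octal_or_space(user):
--             return "Error: Please enter valid octal values (0–7)."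
--
--         out = []
--         for bry in user.split():
--             val = int(bry, 8)               # octal → decimal
--             out.append(format(val, "08b"))  # decimal → 8-bit binary
--         return out
--     except ValueError:
--         return "Error: Please enter valid octal values (0–7)."
--     except Exception:
--         return "Error: Something went wrong while converting octal to binary."
-- ===== SOURCE B (Python) =====
-- _OCT_BITS = {"0": "000", "1": "001", "2": "010", "3": "011",
--              "4": "100", "5": "101", "6": "110", "7": "111"}
--
-- def _is_octal_or_space(s: str) -> bool:
--     """True only if s contains digits 0-7 and/or whitespace."""
--     for ch in s:
--         if ch not in ("0","1","2","3","4","5","6","7"," ", "\t", "\n", "\r"):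
--             return False
--     return True
--
-- def octal_to_binary(user):
--     if not isinstance(user, str):
--         return "Error: Input must be a string of octal values."
--     if not user or user.isspace():
--         return "Error: Please enter something, not just spaces."
--     if not _is_octal_or_space(user):
--         return "Error: Please enter valid octal values (0–7)."
--     # digit-wise conversion: concatenate 3-bit groups, strip the leading
--     # zeros of the high digits, pad back to (at least) 8 bits
--     out = []
--     for tok in user.split():
--         groups = "".join(_OCT_BITS[d] for d in tok)
--         out.append(groups.lstrip("0").zfill(8))
--     return out
-- ===== Notes on version B (the rewrite author's own statement) =====
-- stated objective: alternative
-- what changed: Replaces the per-token arithmetic pipeline (int with base 8, then 8-wide zero-padded binary formatting) by a purely digit-wise textual conversion: each octal digit maps through a fixed table to its 3-bit group, the groups are concatenated, leading zeros stripped and the result zero-filled to 8 characters, so no integer value is ever computed.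
import Mathlib
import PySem

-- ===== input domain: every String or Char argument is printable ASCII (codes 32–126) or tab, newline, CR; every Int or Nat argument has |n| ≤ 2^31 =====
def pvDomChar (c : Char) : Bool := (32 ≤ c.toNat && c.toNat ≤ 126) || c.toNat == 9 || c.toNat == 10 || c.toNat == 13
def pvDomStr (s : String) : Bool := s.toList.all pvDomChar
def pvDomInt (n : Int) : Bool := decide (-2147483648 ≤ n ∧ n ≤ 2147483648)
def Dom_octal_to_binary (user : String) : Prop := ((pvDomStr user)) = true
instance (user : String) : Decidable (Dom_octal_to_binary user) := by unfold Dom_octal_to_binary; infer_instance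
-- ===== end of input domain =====

-- B replaces A's per-token arithmetic (int with base 8, then 8-wide zero-padded binary formatting)
-- by a purely textual digit-wise conversion (3-bit group per octal digit, concatenated, lstrip('0'), zfill(8));
-- objective: alternative (same cost, no integer value is ever computed).

-- ===== PORT A =====
-- the tuple of characters _is_octal_or_space tests against
def pvAllowed : List Char := ['0', '1', '2', '3', '4', '5', '6', '7', ' ', '\t', '\n', '\r']

-- _is_octal_or_space: the for-loop with its early 'return False'
def pvIsOctalOrSpace : List Char → Bool
  | [] => true
  | ch :: rest => if ¬ (ch ∈ pvAllowed) then false else pvIsOctalOrSpace rest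

-- int(bry, 8). In A this is only ever applied to nonempty strings of digits 0–7 (split() tokens
-- of a string that passed the _is_octal_or_space guard); on exactly those inputs int(·, 8) is
-- this left fold (PySem's general int(s, base) parser agrees there).
def pvOctInt (cs : List Char) : Int := cs.foldl (fun a c => 8 * a + ((c.toNat : Int) - 48)) 0

-- the 8-wide zero-padded binary format = zero-fill of the plain binary format to width 8 (val ≥ 0 here)
def octal_to_binary (user : String) : List String :=
  -- the three guards return an error STRING (not a list of strings): outside Pre_octal_to_binary
  if user.toList.isEmpty || PySem.Str.strIsspace user then []
  else if ¬ (pvIsOctalOrSpace user.toList = true) then []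
  else
    (PySem.Str.split₀ user).foldl
      (fun out bry => out ++ [PySem.Str.zfill (PySem.Int.toBin (pvOctInt bry.toList)) 8]) []

-- ===== PORT B =====
-- _OCT_BITS[d]: the fixed digit → 3-bit-group table
def pvOctBits (c : Char) : List Char :=
  if c = '0' then ['0', '0', '0']
  else if c = '1' then ['0', '0', '1']
  else if c = '2' then ['0', '1', '0']
  else if c = '3' then ['0', '1', '1']
  else if c = '4' then ['1', '0', '0']
  else if c = '5' then ['1', '0', '1']
  else if c = '6' then ['1', '1', '0']
  else ['1', '1', '1']

-- Source B: same guards (same helper _is_octal_or_space), then per token: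
-- "".join of the 3-bit groups, .lstrip("0") (= dropWhile (· == '0'), exact), .zfill(8)
def octal_to_binary_alt (user : String) : List String :=
  if user.toList.isEmpty || PySem.Str.strIsspace user then []
  else if ¬ (pvIsOctalOrSpace user.toList = true) then []
  else
    (PySem.Str.split₀ user).map (fun tok =>
      PySem.Str.zfill (String.ofList ((tok.toList.flatMap pvOctBits).dropWhile (· == '0'))) 8)

-- ===== PRECONDITION & SPEC =====
-- Pre_ excludes exactly the inputs on which A returns one of its error STRINGS instead of a
-- list: the empty / all-whitespace strings and strings with a character other than 0–7 and
-- whitespace. It admits every input on which A returns a list.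
def pvOctDigits : List Char := ['0', '1', '2', '3', '4', '5', '6', '7']

def Pre_octal_to_binary (user : String) : Prop :=
  user.toList.all pvAllowed.contains = true ∧ user.toList.any pvOctDigits.contains = true

instance (user : String) : Decidable (Pre_octal_to_binary user) := by
  unfold Pre_octal_to_binary; infer_instance

def pvWitness_octal_to_binary : String := "17 0"

def Spec_octal_to_binary (user : String) (out : List String) : Prop := out = octal_to_binary_alt user
instance (user : String) (out : List String) : Decidable (Spec_octal_to_binary user out) := by unfold Spec_octal_to_binary; infer_instance

-- ===== CLAIM (what is proved, stated in full; the proofs are below) =====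
def Claim_equal_octal_to_binary : Prop := ∀ (user : String), Dom_octal_to_binary user → Pre_octal_to_binary user → Spec_octal_to_binary user (octal_to_binary user)

-- ===== LEMMAS AND PROOFS =====

-- the Nat-valued fold mirroring pvOctInt
def pvOctValN (cs : List Char) : Nat := cs.foldl (fun a c => 8 * a + (c.toNat - 48)) 0

theorem pvDigBounds (c : Char) (h : c ∈ pvOctDigits) : 48 ≤ c.toNat ∧ c.toNat < 56 := by
  fin_cases h <;> decide

theorem pvOctIntFold (cs : List Char) (h : ∀ c ∈ cs, c ∈ pvOctDigits) (a : Nat) :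
    cs.foldl (fun a c => 8 * a + ((c.toNat : Int) - 48)) (a : Int)
      = ((cs.foldl (fun a c => 8 * a + (c.toNat - 48)) a : Nat) : Int) := by
  induction cs generalizing a with
  | nil => simp
  | cons c t ih =>
    have hb := pvDigBounds c (h c (by simp))
    simp only [List.foldl_cons]
    have e : 8 * (a : Int) + ((c.toNat : Int) - 48) = ((8 * a + (c.toNat - 48) : Nat) : Int) := by
      push_cast [Nat.cast_sub hb.1]; ring
    rw [e, ih fun x hx => h x (by simp [hx])]

theorem pvOctInt_eq_natCast (cs : List Char) (h : ∀ c ∈ cs, c ∈ pvOctDigits) :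
    pvOctInt cs = (pvOctValN cs : Int) := by
  simpa [pvOctInt, pvOctValN] using pvOctIntFold cs h 0

theorem pvToBinCharsNat (n : Nat) : PySem.Int.toBinChars (n : Int) = Nat.toDigits 2 n := by
  simp [PySem.Int.toBinChars]

theorem pvShiftBit (n d : Nat) (hn : 0 < n) (hd : d < 2) :
    Nat.toDigits 2 (2 * n + d) = Nat.toDigits 2 n ++ [d.digitChar] := by
  rw [← Nat.toDigits_of_lt_base (by omega : d < 2)]
  exact (Nat.toDigits_append_toDigits (by omega) hn hd).symm

theorem pvShift3 (a b2 b1 b0 : Nat) (ha : 0 < a) (h2 : b2 < 2) (h1 : b1 < 2) (h0 : b0 < 2) :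
    Nat.toDigits 2 (8 * a + (4 * b2 + 2 * b1 + b0)) =
      Nat.toDigits 2 a ++ [b2.digitChar, b1.digitChar, b0.digitChar] := by
  have e : 8 * a + (4 * b2 + 2 * b1 + b0) = 2 * (2 * (2 * a + b2) + b1) + b0 := by ring
  rw [e, pvShiftBit _ _ (by omega) h0, pvShiftBit _ _ (by omega) h1, pvShiftBit _ _ ha h2]
  simp

-- shifting in one octal digit appends its 3-bit group
theorem pvShift8 (a : Nat) (ha : 0 < a) (c : Char) (hc : c ∈ pvOctDigits) :
    Nat.toDigits 2 (8 * a + (c.toNat - 48)) = Nat.toDigits 2 a ++ pvOctBits c := by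
  fin_cases hc
  · simpa [pvOctBits] using pvShift3 a 0 0 0 ha (by norm_num) (by norm_num) (by norm_num)
  · simpa [pvOctBits] using pvShift3 a 0 0 1 ha (by norm_num) (by norm_num) (by norm_num)
  · simpa [pvOctBits] using pvShift3 a 0 1 0 ha (by norm_num) (by norm_num) (by norm_num)
  · simpa [pvOctBits] using pvShift3 a 0 1 1 ha (by norm_num) (by norm_num) (by norm_num)
  · simpa [pvOctBits] using pvShift3 a 1 0 0 ha (by norm_num) (by norm_num) (by norm_num)
  · simpa [pvOctBits] using pvShift3 a 1 0 1 ha (by norm_num) (by norm_num) (by norm_num)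
  · simpa [pvOctBits] using pvShift3 a 1 1 0 ha (by norm_num) (by norm_num) (by norm_num)
  · simpa [pvOctBits] using pvShift3 a 1 1 1 ha (by norm_num) (by norm_num) (by norm_num)

-- dropping the leading zeros of a nonzero digit's 3-bit group leaves its binary digits
theorem pvDropHead (c : Char) (h : c ∈ pvOctDigits) (h0 : c ≠ '0') (r : List Char) :
    (pvOctBits c ++ r).dropWhile (· == '0') = Nat.toDigits 2 (c.toNat - 48) ++ r := by
  fin_cases h
  · exact absurd rfl h0
  all_goals (simp [pvOctBits, List.dropWhile, Nat.toDigits, Nat.toDigitsCore]; decide)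

theorem pvLeFold (t : List Char) (a : Nat) : a ≤ t.foldl (fun a c => 8 * a + (c.toNat - 48)) a := by
  induction t generalizing a with
  | nil => simp
  | cons c t ih => exact le_trans (by omega) (ih (8 * a + (c.toNat - 48)))

theorem pvFoldPos (t : List Char) (h : ∀ c ∈ t, c ∈ pvOctDigits) (a : Nat) (ha : 0 < a) :
    Nat.toDigits 2 (t.foldl (fun a c => 8 * a + (c.toNat - 48)) a) =
      Nat.toDigits 2 a ++ t.flatMap pvOctBits := by
  induction t generalizing a with
  | nil => simp
  | cons c t ih =>
    simp only [List.foldl_cons, List.flatMap_cons]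
    rw [ih (fun x hx => h x (by simp [hx])) _ (by omega),
        pvShift8 a ha c (h c (by simp)), List.append_assoc]

-- the textual conversion of a token equals the binary digits of its octal value
theorem pvDropWhileFlat (t : List Char) (h : ∀ c ∈ t, c ∈ pvOctDigits) :
    (t.flatMap pvOctBits).dropWhile (· == '0') =
      if pvOctValN t = 0 then [] else Nat.toDigits 2 (pvOctValN t) := by
  induction t with
  | nil => simp [pvOctValN]
  | cons c t ih =>
    by_cases hc0 : c = '0'
    · subst hc0
      have hb : pvOctBits '0' = ['0', '0', '0'] := by decide
      have e : pvOctValN ('0' :: t) = pvOctValN t := by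
        simp only [pvOctValN, List.foldl_cons]
        congr 1
      rw [List.flatMap_cons, hb, e]
      simpa [List.dropWhile] using ih fun x hx => h x (by simp [hx])
    · have hcd : c ∈ pvOctDigits := h c (by simp)
      have hdpos : 0 < c.toNat - 48 := by
        fin_cases hcd
        · exact absurd rfl hc0
        all_goals decide
      have e : pvOctValN (c :: t) = t.foldl (fun a c => 8 * a + (c.toNat - 48)) (c.toNat - 48) := by
        simp only [pvOctValN, List.foldl_cons]; norm_num
      have hpos : 0 < pvOctValN (c :: t) := e ▸ lt_of_lt_of_le hdpos (pvLeFold t _)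
      rw [List.flatMap_cons, pvDropHead c hcd hc0, if_neg (by omega), e,
          pvFoldPos t (fun x hx => h x (by simp [hx])) _ hdpos]

theorem pvTokenEq (t : List Char) (h : ∀ c ∈ t, c ∈ pvOctDigits) :
    PySem.Chars.zfill (Nat.toDigits 2 (pvOctValN t)) 8 =
      PySem.Chars.zfill ((t.flatMap pvOctBits).dropWhile (· == '0')) 8 := by
  rw [pvDropWhileFlat t h]
  by_cases h0 : pvOctValN t = 0
  · rw [h0]; rw [if_pos rfl]; decide
  · rw [if_neg h0]

-- characters of user that are not whitespace are octal digits
theorem pvAllowedNotSpace (c : Char) (h : c ∈ pvAllowed) (hs : PySem.Chars.isspace c = false) :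
    c ∈ pvOctDigits := by
  fin_cases h <;> first | decide | (exact absurd hs (by decide))

theorem pvOctNotSpace (c : Char) (h : c ∈ pvOctDigits) : PySem.Chars.isspace c = false := by
  fin_cases h <;> decide

-- every token produced by split() consists of octal digits
theorem pvSplitInv (s : List Char) (cur : List Char) (acc : List (List Char))
    (hs : ∀ c ∈ s, c ∈ pvAllowed) (hcur : ∀ c ∈ cur, c ∈ pvOctDigits)
    (hacc : ∀ t ∈ acc, ∀ c ∈ t, c ∈ pvOctDigits) :
    ∀ t ∈ PySem.Chars.split₀.go s cur acc, ∀ c ∈ t, c ∈ pvOctDigits := by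
  induction s generalizing cur acc with
  | nil =>
    intro t ht
    simp only [PySem.Chars.split₀.go] at ht
    split at ht
    · exact hacc t (by simpa using ht)
    · rcases (by simpa using ht : t ∈ acc ∨ t = cur.reverse) with h | h
      · exact hacc t h
      · subst h; intro c hc; exact hcur c (by simpa using hc)
  | cons c rest ih =>
    intro t ht
    simp only [PySem.Chars.split₀.go] at ht
    by_cases hsp : PySem.Chars.isspace c = true
    · rw [if_pos hsp] at ht
      split at ht
      · exact ih [] acc (fun x hx => hs x (by simp [hx])) (by simp) hacc t ht
      · refine ih [] (cur.reverse :: acc) (fun x hx => hs x (by simp [hx])) (by simp) ?_ t ht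
        intro u hu
        rcases List.mem_cons.mp hu with h | h
        · subst h; intro x hx; exact hcur x (by simpa using hx)
        · exact hacc u h
    · rw [if_neg hsp] at ht
      refine ih (c :: cur) acc (fun x hx => hs x (by simp [hx])) ?_ hacc t ht
      intro x hx
      rcases List.mem_cons.mp hx with rfl | hx
      · exact pvAllowedNotSpace x (hs x (by simp)) (by simpa using hsp)
      · exact hcur x hx

theorem pvIsOctalOrSpace_true (l : List Char) (h : ∀ c ∈ l, c ∈ pvAllowed) :
    pvIsOctalOrSpace l = true := by
  induction l with
  | nil => rfl
  | cons c t ih =>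
    simp only [pvIsOctalOrSpace]
    rw [if_neg (by simpa using h c (by simp))]
    exact ih fun x hx => h x (by simp [hx])

-- ===== VERDICT (by name: the statement is the Claim_ definition above) =====
theorem octal_to_binary_spec : Claim_equal_octal_to_binary := by
  intro user _ hpre
  have hall : ∀ c ∈ user.toList, c ∈ pvAllowed := by
    simpa [List.all_eq_true] using hpre.1
  obtain ⟨c0, hc0mem, hc0⟩ : ∃ c ∈ user.toList, c ∈ pvOctDigits := by
    simpa [List.any_eq_true] using hpre.2
  unfold Spec_octal_to_binary octal_to_binary octal_to_binary_alt
  have hne : user.toList.isEmpty = false := by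
    cases h : user.toList with
    | nil => rw [h] at hc0mem; cases hc0mem
    | cons a l => rfl
  have hsp : PySem.Str.strIsspace user = false := by
    simp only [PySem.Str.strIsspace, PySem.Chars.strIsspace, Bool.and_eq_false_iff]
    right
    exact List.all_eq_false.mpr ⟨c0, hc0mem, by simp [pvOctNotSpace c0 hc0]⟩
  rw [hne, hsp]
  simp only [Bool.or_self, Bool.false_eq_true, if_false]
  rw [pvIsOctalOrSpace_true user.toList hall]
  simp only [not_true, if_false]
  rw [PySem.List.foldl_append_singleton_eq_map, List.nil_append]
  rw [PySem.Str.split₀.eq_1, List.map_map, List.map_map]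
  refine List.map_congr_left ?_
  intro t ht
  have htoct : ∀ c ∈ t, c ∈ pvOctDigits := by
    have := pvSplitInv user.toList [] [] hall (by simp) (by simp)
    simp only [PySem.Chars.split₀] at ht ⊢
    exact this t ht
  simp only [Function.comp_apply, String.toList_ofList]
  rw [pvOctInt_eq_natCast t htoct]
  simp only [PySem.Int.toBin, PySem.Str.zfill, String.toList_ofList, pvToBinCharsNat]
  exact congrArg String.ofList (pvTokenEq t htoct)
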